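-- pv_equiv track=rewrite | github.com/abhishekthukaram/Python-Projects | SolvedOnes/balanced.py | balancedlist
-- ===== SOURCE A (Python) =====
-- def balancedlist(input_list):
--     break_list = []
--     for i in range(len(input_list)):
--         if sum(break_list) != sum(input_list):
--             temp = input_list.pop(0)
--             break_list.append(temp)
--         else:
--             break
--     return break_list, input_list
-- ===== SOURCE B (Python) =====
-- def balancedlist(input_list):
--     total = sum(input_list)
--     prefix = 0
--     for k in range(len(input_list)):
--         if 2 * prefix == total:
--             return input_list[:k], input_list[k:]
--         prefix += input_list[k]
--     return input_list[:], []
-- ===== Notes on version B (the rewrite author's own statement) =====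
-- stated objective: faster
-- what changed: Replaces the pop(0)-and-resum loop (sum of both halves recomputed each step) by a single pass with a running prefix sum compared against the fixed total, returning list slices instead of mutating; A mutates input_list in place, B does not (return-value equivalence).
import Mathlib
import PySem

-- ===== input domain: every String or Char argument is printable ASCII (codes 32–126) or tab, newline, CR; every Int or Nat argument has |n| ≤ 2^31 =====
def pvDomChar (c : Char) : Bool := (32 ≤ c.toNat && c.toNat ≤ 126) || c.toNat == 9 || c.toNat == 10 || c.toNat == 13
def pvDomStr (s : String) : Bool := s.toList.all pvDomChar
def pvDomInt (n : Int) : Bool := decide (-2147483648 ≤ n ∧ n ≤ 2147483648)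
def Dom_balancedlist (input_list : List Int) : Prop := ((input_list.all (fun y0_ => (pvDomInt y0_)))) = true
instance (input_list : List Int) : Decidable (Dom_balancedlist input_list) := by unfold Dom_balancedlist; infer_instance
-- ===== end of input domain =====

-- B replaces A's quadratic pop(0)+re-sum loop by one O(n) pass with a running prefix sum;
-- A mutates input_list in place, B does not: the equivalence proved is about the return value only.

-- ===== PORT A =====
-- loop 'for i in range(len(input_list))': fuel = original length; the [] pop case is unreachable
def balancedlistLoopA (fuel : Nat) (break_list input_list : List Int) : List Int × List Int :=
  match fuel with
  | 0 => (break_list, input_list)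
  | n + 1 =>
    if break_list.sum ≠ input_list.sum then
      match input_list with
      | [] => (break_list, [])          -- pop(0) on []: never reached (fuel ≤ remaining length)
      | t :: rest => balancedlistLoopA n (break_list ++ [t]) rest
    else (break_list, input_list)

def balancedlist (input_list : List Int) : List Int × List Int :=
  balancedlistLoopA input_list.length [] input_list

-- ===== PORT B =====
def balancedlistLoopB (total : Int) (pfx : Int) (k : Nat) (input_list : List Int) :
    List Int × List Int :=
  if h : k < input_list.length then
    if 2 * pfx = total then (input_list.take k, input_list.drop k)
    else balancedlistLoopB total (pfx + input_list[k]) (k + 1) input_list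
  else (input_list, [])
termination_by input_list.length - k

def balancedlist_alt (input_list : List Int) : List Int × List Int :=
  balancedlistLoopB input_list.sum 0 0 input_list

-- ===== PRECONDITION & SPEC =====
def Spec_balancedlist (input_list : List Int) (out : List Int × List Int) : Prop := out = balancedlist_alt input_list
instance (input_list : List Int) (out : List Int × List Int) : Decidable (Spec_balancedlist input_list out) := by unfold Spec_balancedlist; infer_instance

-- ===== CLAIM (what is proved, stated in full; the proofs are below) =====
def Claim_equal_balancedlist : Prop := ∀ (input_list : List Int), Dom_balancedlist input_list → Spec_balancedlist input_list (balancedlist input_list)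

-- ===== LEMMAS AND PROOFS =====

-- invariant: after k pops A's state is (take k, drop k); B's prefix is (take k).sum
theorem balancedlist_loop_eq (il : List Int) (k : Nat) (hk : k ≤ il.length) :
    balancedlistLoopA (il.length - k) (il.take k) (il.drop k)
      = balancedlistLoopB il.sum (il.take k).sum k il := by
  by_cases h : k < il.length
  · have hlt : il.length - k = (il.length - (k + 1)) + 1 := by omega
    have hdrop : il.drop k = il[k] :: il.drop (k + 1) := List.drop_eq_getElem_cons h
    have htake : il.take (k + 1) = il.take k ++ [il[k]] := by
      rw [List.take_add_one, List.getElem?_eq_getElem h]; rfl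
    have hsum : il.sum = (il.take k).sum + il[k] + (il.drop (k + 1)).sum := by
      conv_lhs => rw [← List.take_append_drop k il]
      rw [List.sum_append, hdrop, List.sum_cons]; ring
    rw [hlt, hdrop]
    unfold balancedlistLoopA
    rw [balancedlistLoopB]
    simp only [h, dif_pos, List.sum_cons]
    by_cases heq : 2 * (il.take k).sum = il.sum
    · rw [if_neg (show ¬ ((il.take k).sum ≠ il[k] + (il.drop (k + 1)).sum) by omega),
        if_pos heq, ← hdrop]
    · rw [if_pos (show (il.take k).sum ≠ il[k] + (il.drop (k + 1)).sum by omega),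
        if_neg heq, ← htake]
      have hrec := balancedlist_loop_eq il (k + 1) (by omega)
      have hps : (il.take (k + 1)).sum = (il.take k).sum + il[k] := by
        rw [htake, List.sum_append, List.sum_cons, List.sum_nil, add_zero]
      rw [← hps]
      exact hrec
  · have hk' : k = il.length := by omega
    subst hk'
    simp [balancedlistLoopA, balancedlistLoopB]
termination_by il.length - k

-- ===== VERDICT (by name: the statement is the Claim_ definition above) =====
theorem balancedlist_spec : Claim_equal_balancedlist := by
  intro il _
  unfold Spec_balancedlist balancedlist balancedlist_alt
  have := balancedlist_loop_eq il 0 (Nat.zero_le _)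
  simpa using this
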